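-- pv_equiv track=rewrite | github.com/pkgcore/pkgcore | src/pkgcore/ebuild/filter_env.py | is_envvar
-- ===== SOURCE A (Python) =====
-- def is_envvar(buff, pos):
--     """:return: start, end, pos or None, None, None tuple."""
--     try:
--         while buff[pos] in ' \t':
--             pos += 1
--         start = pos
--         while True:
--             if buff[pos] in '\0"\'()- \t\n':
--                 return None, None, None
--             if buff[pos] == '=':
--                 if pos == start:
--                     return None, None, None
--                 return start, pos, pos + 1
--             pos += 1
--     except IndexError:
--         return None, None, None
-- ===== SOURCE B (Python) =====
-- import re
--
-- # name = run of chars that are not NUL, quote, paren, dash, whitespace or '=',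
-- # preceded by optional spaces/tabs and followed by '='
-- _ENVVAR_RE = re.compile(r"[ \t]*([^\x00\"'()\-= \t\n]+)=")
--
--
-- def is_envvar(buff, pos):
--     """:return: start, end, pos or None, None, None tuple."""
--     m = _ENVVAR_RE.match(buff, pos)
--     if m is None:
--         return None, None, None
--     return m.start(1), m.end(1), m.end(1) + 1
-- ===== Notes on version B (the rewrite author's own statement) =====
-- stated objective: idiomatic
-- what changed: Replaces the two hand-written index-stepping scan loops with a single anchored compiled regex ([ \t]*(name)+=) whose C-level match loop yields start/end directly.
-- outside the precondition, e.g. on is_envvar('A=', -2): A returns (-2, -1, 0), B returns (0, 1, 2)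
import Mathlib
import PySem

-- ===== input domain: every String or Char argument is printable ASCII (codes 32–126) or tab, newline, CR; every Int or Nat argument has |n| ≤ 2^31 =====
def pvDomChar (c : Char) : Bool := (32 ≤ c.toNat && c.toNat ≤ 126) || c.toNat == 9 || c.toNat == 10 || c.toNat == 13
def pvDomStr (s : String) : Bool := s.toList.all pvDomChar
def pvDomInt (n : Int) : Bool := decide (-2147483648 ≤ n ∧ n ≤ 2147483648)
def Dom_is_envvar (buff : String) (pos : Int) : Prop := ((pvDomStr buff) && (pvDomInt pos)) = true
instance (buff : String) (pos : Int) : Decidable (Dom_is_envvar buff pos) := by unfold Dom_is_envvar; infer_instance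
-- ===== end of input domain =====

-- B replaces A's two hand-written index-stepping loops by one anchored regex match (more idiomatic); equivalence is claimed for pos ≥ 0 (see Pre_).

-- ===== PORT A =====

-- `pos < length` out of a successful pyGet?, for the termination measures below
theorem pv_pyGet?_lt {α : Type} {l : List α} {i : Int} {c : α}
    (h : PySem.List.pyGet? l i = some c) : i < (l.length : Int) := by
  by_contra hn
  have h2 : PySem.List.pyGet? l i = none :=
    (PySem.List.pyGet?_eq_none_iff l i).2 (by simp [PySem.Raise.InRange]; omega)
  rw [h2] at h; simp at h

-- inner `while True` loop of A: scan from `pos`, `start` fixed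
def pvAScan (l : List Char) (start pos : Int) : Option Int × Option Int × Option Int :=
  match h : PySem.List.pyGet? l pos with
  | none => (none, none, none)          -- IndexError
  | some c =>
    if c = '\x00' ∨ c = '"' ∨ c = '\'' ∨ c = '(' ∨ c = ')' ∨ c = '-' ∨ c = ' ' ∨ c = '\t' ∨ c = '\n' then
      (none, none, none)
    else if c = '=' then
      if pos = start then (none, none, none) else (some start, some pos, some (pos + 1))
    else pvAScan l start (pos + 1)
termination_by ((l.length : Int) - pos).toNat
decreasing_by have := pv_pyGet?_lt h; omega

-- leading `while buff[pos] in ' \t'` loop of A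
def pvASkip (l : List Char) (pos : Int) : Option Int × Option Int × Option Int :=
  match h : PySem.List.pyGet? l pos with
  | none => (none, none, none)          -- IndexError
  | some c =>
    if c = ' ' ∨ c = '\t' then pvASkip l (pos + 1)
    else pvAScan l pos pos
termination_by ((l.length : Int) - pos).toNat
decreasing_by have := pv_pyGet?_lt h; omega

def is_envvar (buff : String) (pos : Int) : Option Int × Option Int × Option Int :=
  pvASkip buff.toList pos

-- ===== PORT B =====

-- the negated character class [^\x00"'()\-= \t\n] of B's regex
def pvNameChar (c : Char) : Bool :=
  !(c = '\x00' || c = '"' || c = '\'' || c = '(' || c = ')' || c = '-' || c = '=' || c = ' ' || c = '\t' || c = '\n')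

-- Hand transliteration of the regex `[ \t]*([^\x00"'()\-= \t\n]+)=` matched at index i.
-- Exact because the two quantified classes are disjoint from each other and from '=',
-- so the greedy quantifiers never backtrack: the match is 'skip the maximal ws run,
-- take the maximal nonempty run of name chars, require the next char to be ='.
def pvBmatch (l : List Char) (i : Nat) : Option Int × Option Int × Option Int :=
  let ws := (l.drop i).takeWhile (fun c => c = ' ' || c = '\t')
  let s := i + ws.length
  let name := (l.drop s).takeWhile pvNameChar
  let e := s + name.length
  if name ≠ [] ∧ l[e]? = some '=' then (some (s : Int), some (e : Int), some ((e : Int) + 1))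
  else (none, none, none)

def is_envvar_alt (buff : String) (pos : Int) : Option Int × Option Int × Option Int :=
  pvBmatch buff.toList (max pos 0).toNat    -- re.match clamps a negative pos to 0

-- ===== PRECONDITION & SPEC =====
-- Pre_ excludes negative pos, outside the scanner's natural domain: there A's manual
-- indexing wraps around to the end of the buffer while B's re.match clamps pos to 0.
def Pre_is_envvar (buff : String) (pos : Int) : Prop := 0 ≤ pos
instance (buff : String) (pos : Int) : Decidable (Pre_is_envvar buff pos) := by unfold Pre_is_envvar; infer_instance
def pvWitness_is_envvar : String × Int := ("  FOO=bar", 0)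

def Spec_is_envvar (buff : String) (pos : Int) (out : Option Int × Option Int × Option Int) : Prop := out = is_envvar_alt buff pos
instance (buff : String) (pos : Int) (out : Option Int × Option Int × Option Int) : Decidable (Spec_is_envvar buff pos out) := by unfold Spec_is_envvar; infer_instance

-- ===== CLAIM (what is proved, stated in full; the proofs are below) =====
def Claim_equal_is_envvar : Prop := ∀ (buff : String) (pos : Int), Dom_is_envvar buff pos → Pre_is_envvar buff pos → Spec_is_envvar buff pos (is_envvar buff pos)

-- ===== LEMMAS AND PROOFS =====

theorem pv_drop_cons {l : List Char} {i : Nat} {c : Char} (hgi : l[i]? = some c) :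
    l.drop i = c :: l.drop (i + 1) := by
  have hlt : i < l.length := by
    by_contra hn
    rw [List.getElem?_eq_none_iff.2 (by omega)] at hgi; simp at hgi
  rw [List.drop_eq_getElem_cons hlt]
  have h2 := List.getElem?_eq_getElem hlt
  rw [h2] at hgi
  rw [Option.some.inj hgi]

theorem pvAScan_char (l : List Char) (s : Nat) : ∀ (k i : Nat), l.length - i ≤ k →
    pvAScan l s i =
      (let name := (l.drop i).takeWhile pvNameChar
       let e := i + name.length
       if l[e]? = some '=' then
         (if e = s then ((none : Option Int), (none : Option Int), (none : Option Int))
          else (some (s : Int), some (e : Int), some ((e : Int) + 1)))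
       else (none, none, none)) := by
  intro k
  induction k with
  | zero =>
    intro i hk
    have hlen : l.length ≤ i := by omega
    have hgi : l[i]? = none := List.getElem?_eq_none_iff.2 hlen
    rw [pvAScan]
    split
    · simp [List.drop_eq_nil_of_le hlen, hgi]
    · next c h =>
      have hc : l[i]? = some c := by simpa using h
      rw [hgi] at hc; simp at hc
  | succ k ih =>
    intro i hk
    rw [pvAScan]
    split
    · next h =>
      have hgi : l[i]? = none := by simpa using h
      have hlen : l.length ≤ i := List.getElem?_eq_none_iff.1 hgi
      simp [List.drop_eq_nil_of_le hlen, hgi]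
    · next c h =>
      have hgi : l[i]? = some c := by simpa using h
      have hdrop := pv_drop_cons hgi
      by_cases hforb : c = '\x00' ∨ c = '"' ∨ c = '\'' ∨ c = '(' ∨ c = ')' ∨ c = '-' ∨ c = ' ' ∨ c = '\t' ∨ c = '\n'
      · -- forbidden char: the name run is empty and l[i] ≠ '='
        have hname : ¬ pvNameChar c = true := by
          rcases hforb with h'|h'|h'|h'|h'|h'|h'|h'|h' <;> simp [pvNameChar, h']
        have hne : c ≠ '=' := by
          rcases hforb with h'|h'|h'|h'|h'|h'|h'|h'|h' <;> simp [h']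
        have htw : (l.drop i).takeWhile pvNameChar = [] := by
          rw [hdrop, List.takeWhile_cons_of_neg (by simpa using hname)]
        rw [if_pos hforb]
        simp [htw, hgi, hne]
      · by_cases heq : c = '='
        · have htw : (l.drop i).takeWhile pvNameChar = [] := by
            rw [hdrop, heq, List.takeWhile_cons_of_neg (by decide)]
          rw [if_neg hforb, if_pos heq]
          subst heq
          simp only [htw, List.length_nil, Nat.add_zero, hgi, if_pos rfl]
          by_cases his : i = s
          · simp [his]
          · have : (i : Int) ≠ (s : Int) := by exact_mod_cast his
            simp [his, this]
        · -- name char: A recurses at pos+1, the name run absorbs c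
          have hname : pvNameChar c = true := by
            simp only [pvNameChar, Bool.not_eq_true']
            push_neg at hforb
            simp [hforb.1, hforb.2.1, hforb.2.2.1, hforb.2.2.2.1, hforb.2.2.2.2.1,
              hforb.2.2.2.2.2.1, heq, hforb.2.2.2.2.2.2.1, hforb.2.2.2.2.2.2.2.1,
              hforb.2.2.2.2.2.2.2.2]
          have htw : (l.drop i).takeWhile pvNameChar = c :: (l.drop (i+1)).takeWhile pvNameChar := by
            rw [hdrop, List.takeWhile_cons_of_pos hname]
          rw [if_neg hforb, if_neg heq]
          have hcast : ((i : Int) + 1) = ((i + 1 : Nat) : Int) := by push_cast; ring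
          rw [hcast, ih (i + 1) (by omega)]
          simp only [htw, List.length_cons]
          have harith : i + (((l.drop (i+1)).takeWhile pvNameChar).length + 1)
              = i + 1 + ((l.drop (i+1)).takeWhile pvNameChar).length := by omega
          rw [harith]

theorem pvASkip_eq (l : List Char) : ∀ (k i : Nat), l.length - i ≤ k →
    pvASkip l i = pvBmatch l i := by
  intro k
  induction k with
  | zero =>
    intro i hk
    have hlen : l.length ≤ i := by omega
    have hgi : l[i]? = none := List.getElem?_eq_none_iff.2 hlen
    rw [pvASkip]
    split
    · simp [pvBmatch, List.drop_eq_nil_of_le hlen]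
    · next c h =>
      have hc : l[i]? = some c := by simpa using h
      rw [hgi] at hc; simp at hc
  | succ k ih =>
    intro i hk
    rw [pvASkip]
    split
    · next h =>
      have hgi : l[i]? = none := by simpa using h
      have hlen : l.length ≤ i := List.getElem?_eq_none_iff.1 hgi
      simp [pvBmatch, List.drop_eq_nil_of_le hlen]
    · next c h =>
      have hgi : l[i]? = some c := by simpa using h
      have hdrop := pv_drop_cons hgi
      by_cases hws : c = ' ' ∨ c = '\t'
      · -- whitespace: skip loop advances; B's ws run absorbs c
        have hwsb : (c = ' ' || c = '\t') = true := by rcases hws with h'|h' <;> simp [h']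
        have htw : (l.drop i).takeWhile (fun c => c = ' ' || c = '\t')
            = c :: (l.drop (i+1)).takeWhile (fun c => c = ' ' || c = '\t') := by
          rw [hdrop]; simp [List.takeWhile_cons, hwsb]
        have hcast : ((i : Int) + 1) = ((i + 1 : Nat) : Int) := by push_cast; ring
        rw [if_pos hws, hcast, ih (i + 1) (by omega)]
        simp only [pvBmatch, htw, List.length_cons]
        have harith : i + (((l.drop (i+1)).takeWhile (fun c => c = ' ' || c = '\t')).length + 1)
            = i + 1 + ((l.drop (i+1)).takeWhile (fun c => c = ' ' || c = '\t')).length := by omega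
        rw [harith]
      · -- non-ws: A enters the scan loop with start = i; B's ws run is empty
        have hwsb : ¬ (c = ' ' || c = '\t') = true := by
          push_neg at hws; simp [hws.1, hws.2]
        have htw : (l.drop i).takeWhile (fun c => c = ' ' || c = '\t') = [] := by
          rw [hdrop, List.takeWhile_cons_of_neg (by simpa using hwsb)]
        rw [if_neg hws, pvAScan_char l i (l.length - i) i (le_refl _)]
        simp only [pvBmatch, htw, List.length_nil, Nat.add_zero]
        set name := (l.drop i).takeWhile pvNameChar with hnamedef
        by_cases hget : l[i + name.length]? = some '='
        · rw [if_pos hget]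
          by_cases hnil : name = []
          · have hz : name.length = 0 := by rw [hnil]; rfl
            simp [hz, hnil]
          · have hne : i + name.length ≠ i := by
              have := List.length_pos_iff.2 hnil; omega
            simp [hnil, hget, hne]
        · simp [hget]

-- ===== VERDICT (by name: the statement is the Claim_ definition above) =====
theorem is_envvar_spec : Claim_equal_is_envvar := by
  intro buff pos _ hpre
  unfold Spec_is_envvar is_envvar is_envvar_alt
  have hp : (0 : Int) ≤ pos := hpre
  have hmax : max pos 0 = pos := by omega
  have hcast : pos = ((pos.toNat : Nat) : Int) := (Int.toNat_of_nonneg hpre).symm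
  rw [hmax, hcast]
  exact pvASkip_eq buff.toList (buff.toList.length - pos.toNat) pos.toNat (le_refl _)
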